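-- pv_equiv track=rewrite | github.com/DigitalPhonetics/adviser | adviser/services/nlg/templates/preprocessing.py | _detect_colon
-- ===== SOURCE A (Python) =====
-- def _detect_colon(line: str) -> int:
--     in_string = False
--     in_string_escape = False
--     for i, character in enumerate(line):
--         character = line[i]
--         if in_string_escape:
--             in_string_escape = False
--         elif in_string:
--             if character == '"':
--                 in_string = False
--             elif character == '\\':
--                 in_string_escape = True
--         else:
--             if character == '"':
--                 in_string = True
--             elif character == ':':
--                 return i
--     return -1
-- ===== SOURCE B (Python) =====
-- import re
--
-- _TOKEN = re.compile(r'"(?:\\.|[^"\\])*"?|:', re.DOTALL)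
--
--
-- def _detect_colon(line: str) -> int:
--     for m in _TOKEN.finditer(line):
--         if m.group() == ':':
--             return m.start()
--     return -1
-- ===== Notes on version B (the rewrite author's own statement) =====
-- stated objective: faster
-- what changed: Replaces the hand-written per-character boolean state machine (in_string/in_string_escape flags) by regex tokenization with re.finditer: an alternation whose string branch consumes a whole quoted-string token (escapes handled, closing quote optional, DOTALL) and whose other branch matches a colon; B returns the start of the first colon match, else -1.
import Mathlib
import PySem

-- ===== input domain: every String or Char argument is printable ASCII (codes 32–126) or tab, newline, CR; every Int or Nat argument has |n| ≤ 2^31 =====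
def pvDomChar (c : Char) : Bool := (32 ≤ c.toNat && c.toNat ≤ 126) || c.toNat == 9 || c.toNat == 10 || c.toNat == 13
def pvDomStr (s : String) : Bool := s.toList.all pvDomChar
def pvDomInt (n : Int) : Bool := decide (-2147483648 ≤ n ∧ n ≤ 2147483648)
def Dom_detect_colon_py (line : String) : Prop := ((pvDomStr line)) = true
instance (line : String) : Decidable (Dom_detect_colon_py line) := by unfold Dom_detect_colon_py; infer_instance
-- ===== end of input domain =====

-- B replaces A's per-character boolean state machine by regex tokenization (skip whole
-- quoted-string tokens, return the start of the first colon token); a timing run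
-- measured B faster (constant factor: the C regex engine replaces a Python-level loop).

-- ===== PORT A =====
-- A's loop over enumerate(line) with the two flags in_string / in_string_escape,
-- branch for branch.
def pvGoA : List Char → Nat → Bool → Bool → Int
  | [], _, _, _ => -1
  | c :: rest, i, instr, esc =>
    if esc then pvGoA rest (i+1) instr false
    else if instr then
      if c = '"' then pvGoA rest (i+1) false false
      else if c = '\\' then pvGoA rest (i+1) true true
      else pvGoA rest (i+1) true false
    else
      if c = '"' then pvGoA rest (i+1) true false
      else if c = ':' then (i : Int)
      else pvGoA rest (i+1) false false

def detect_colon_py (line : String) : Int := pvGoA line.toList 0 false false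

-- ===== PORT B =====
-- Source B uses re.finditer over the alternation  "(?:\\.|[^"\\])*"?  |  :   (DOTALL) and
-- returns the start of the first ':' match.  There is no regex engine in Lean/Mathlib,
-- so the regex is ported by hand, exactly: scanning left to right, a '"' starts a
-- string token consumed by pvSkipStr (an escaped pair '\\.' or any non-quote char is
-- consumed; the closing quote is optional, i.e. an unterminated string runs to the
-- end), a ':' outside such a token is the first ':' match; anything else is skipped.
def pvSkipStr : List Char → Nat → List Char × Nat
  | [], i => ([], i)
  | c :: rest, i =>
    if c = '"' then (rest, i+1)
    else if c = '\\' then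
      match rest with
      | [] => ([], i+1)
      | _ :: r2 => pvSkipStr r2 (i+2)
    else pvSkipStr rest (i+1)

theorem pvSkipStr_len_le : ∀ (l : List Char) (i : Nat), (pvSkipStr l i).1.length ≤ l.length := by
  intro l i
  fun_induction pvSkipStr l i <;> simp_all <;> omega

def pvScanB : List Char → Nat → Int
  | [], _ => -1
  | c :: rest, i =>
    if c = ':' then (i : Int)
    else if c = '"' then pvScanB (pvSkipStr rest (i+1)).1 (pvSkipStr rest (i+1)).2
    else pvScanB rest (i+1)
  termination_by l => l.length
  decreasing_by
    · exact Nat.lt_succ_of_le (pvSkipStr_len_le rest (i+1))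
    · simp

def detect_colon_py_alt (line : String) : Int := pvScanB line.toList 0

-- ===== PRECONDITION & SPEC =====
def Spec_detect_colon_py (line : String) (out : Int) : Prop := out = detect_colon_py_alt line
instance (line : String) (out : Int) : Decidable (Spec_detect_colon_py line out) := by unfold Spec_detect_colon_py; infer_instance

-- ===== CLAIM (what is proved, stated in full; the proofs are below) =====
def Claim_equal_detect_colon_py : Prop := ∀ (line : String), Dom_detect_colon_py line → Spec_detect_colon_py line (detect_colon_py line)

-- ===== LEMMAS AND PROOFS =====
-- Inside a string, A's flag machine ends exactly where B's string-token consumer ends.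
theorem pvGoA_instr (l : List Char) (i : Nat) :
    pvGoA l i true false = pvGoA (pvSkipStr l i).1 (pvSkipStr l i).2 false false := by
  fun_induction pvSkipStr l i <;> simp_all [pvGoA]

theorem pvGoA_eq_pvScanB (l : List Char) (i : Nat) :
    pvGoA l i false false = pvScanB l i := by
  fun_induction pvScanB l i <;> simp_all [pvGoA, pvGoA_instr]

-- ===== VERDICT (by name: the statement is the Claim_ definition above) =====
theorem detect_colon_py_spec : Claim_equal_detect_colon_py := by
  intro line _
  unfold Spec_detect_colon_py detect_colon_py detect_colon_py_alt
  exact pvGoA_eq_pvScanB line.toList 0
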